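-- pv_equiv track=rewrite | github.com/yao-care/ZaTxGNN | scripts/fetchers/za_news.py | filter_health_news
-- ===== SOURCE A (Python) =====
-- HEALTH_KEYWORDS = [
--     "health", "medicine", "drug", "pharmaceutical", "clinical trial",
--     "SAHPRA", "medical", "hospital", "treatment", "therapy",
--     "doctor", "patient", "disease", "virus", "vaccine",
--     "HIV", "AIDS", "tuberculosis", "TB", "malaria",
--     "diabetes", "hypertension", "cancer", "COVID",
-- ]
--
-- SA_NEWS_DOMAINS = [
--     "news24.com",
--     "dailymaverick.co.za",
--     "timeslive.co.za",
--     "iol.co.za",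
--     "ewn.co.za",
--     "health24.com",
--     "businesslive.co.za",
--     "mg.co.za",  # Mail & Guardian
-- ]
--
-- def filter_health_news(items: list[dict]) -> list[dict]:
--     """Filter news items to health-related content.
--
--     Args:
--         items: List of news items
--
--     Returns:
--         Filtered list of health-related news
--     """
--     health_items = []
--
--     for item in items:
--         title = item.get("title", "").lower()
--         source = item.get("source", "").lower()
--
--         # Check if title contains health keywords
--         is_health = any(kw.lower() in title for kw in HEALTH_KEYWORDS)
--
--         # Check if source is a known SA news domain
--         is_sa_source = any(domain in source for domain in SA_NEWS_DOMAINS)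
--
--         if is_health or is_sa_source:
--             health_items.append(item)
--
--     return health_items
-- ===== SOURCE B (Python) =====
-- import re
--
-- HEALTH_KEYWORDS = [
--     "health", "medicine", "drug", "pharmaceutical", "clinical trial",
--     "SAHPRA", "medical", "hospital", "treatment", "therapy",
--     "doctor", "patient", "disease", "virus", "vaccine",
--     "HIV", "AIDS", "tuberculosis", "TB", "malaria",
--     "diabetes", "hypertension", "cancer", "COVID",
-- ]
--
-- SA_NEWS_DOMAINS = [
--     "news24.com",
--     "dailymaverick.co.za",
--     "timeslive.co.za",
--     "iol.co.za",
--     "ewn.co.za",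
--     "health24.com",
--     "businesslive.co.za",
--     "mg.co.za",  # Mail & Guardian
-- ]
--
-- # one compiled case-insensitive alternation per pattern list, built once at import time
-- _KW_RE = re.compile("|".join(map(re.escape, HEALTH_KEYWORDS)), re.IGNORECASE)
-- _DOM_RE = re.compile("|".join(map(re.escape, SA_NEWS_DOMAINS)), re.IGNORECASE)
--
--
-- def filter_health_news(items: list[dict]) -> list[dict]:
--     """Filter news items to health-related content.
--
--     Args:
--         items: List of news items
--
--     Returns:
--         Filtered list of health-related news
--     """
--     return [
--         item
--         for item in items
--         if _KW_RE.search(item.get("title", "")) or _DOM_RE.search(item.get("source", ""))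
--     ]
-- ===== Notes on version B (the rewrite author's own statement) =====
-- stated objective: idiomatic
-- what changed: Replaces the per-item any()-over-list lowered substring scans with two module-level compiled case-insensitive regex alternations (re.escape'd keywords/domains joined by '|') searched once per field, and the accumulator loop with a list comprehension.
import Mathlib
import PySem

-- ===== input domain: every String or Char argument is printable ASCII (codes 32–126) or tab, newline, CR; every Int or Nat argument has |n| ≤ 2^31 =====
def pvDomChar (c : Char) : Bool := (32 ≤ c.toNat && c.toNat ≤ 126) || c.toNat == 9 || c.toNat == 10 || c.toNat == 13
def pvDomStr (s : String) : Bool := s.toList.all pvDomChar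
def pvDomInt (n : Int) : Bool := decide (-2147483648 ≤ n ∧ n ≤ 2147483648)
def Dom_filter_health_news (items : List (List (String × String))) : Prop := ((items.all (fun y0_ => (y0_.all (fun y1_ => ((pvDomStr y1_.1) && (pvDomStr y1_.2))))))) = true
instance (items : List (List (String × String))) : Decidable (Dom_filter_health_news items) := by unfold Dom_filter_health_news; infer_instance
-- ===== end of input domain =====

-- B replaces the per-item any()-over-keyword lowered substring scans with two compiled
-- case-insensitive regex alternations (one per pattern list) searched once per field,
-- and the accumulator loop with a list comprehension (idiomatic; same cost).
-- ===== PORT A =====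
def HEALTH_KEYWORDS : List String :=
  ["health", "medicine", "drug", "pharmaceutical", "clinical trial",
   "SAHPRA", "medical", "hospital", "treatment", "therapy",
   "doctor", "patient", "disease", "virus", "vaccine",
   "HIV", "AIDS", "tuberculosis", "TB", "malaria",
   "diabetes", "hypertension", "cancer", "COVID"]

def SA_NEWS_DOMAINS : List String :=
  ["news24.com", "dailymaverick.co.za", "timeslive.co.za", "iol.co.za",
   "ewn.co.za", "health24.com", "businesslive.co.za", "mg.co.za"]

def filter_health_news (items : List (List (String × String))) : List (List (String × String)) :=
  items.foldl (fun health_items item =>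
    let title := PySem.Str.lower (PySem.Dict.getD ⟨item⟩ "title" "")
    let source := PySem.Str.lower (PySem.Dict.getD ⟨item⟩ "source" "")
    let is_health := HEALTH_KEYWORDS.any (fun kw => PySem.Str.isIn (PySem.Str.lower kw) title)
    let is_sa_source := SA_NEWS_DOMAINS.any (fun domain => PySem.Str.isIn domain source)
    if is_health || is_sa_source then health_items ++ [item] else health_items) []

-- ===== PORT B =====
-- Source B's compiled regex: an IGNORECASE alternation of the re.escape()'d patterns,
-- searched in `text`. Its contract (exact on the ASCII domain): some pattern occurs in
-- the text as a case-insensitive substring. Ported as that library contract.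
def reSearchCI (patterns : List String) (text : String) : Bool :=
  patterns.any (fun p => PySem.Str.isIn (PySem.Str.lower p) (PySem.Str.lower text))

def filter_health_news_alt (items : List (List (String × String))) : List (List (String × String)) :=
  items.filter (fun item =>
    reSearchCI HEALTH_KEYWORDS (PySem.Dict.getD ⟨item⟩ "title" "")
    || reSearchCI SA_NEWS_DOMAINS (PySem.Dict.getD ⟨item⟩ "source" ""))

-- ===== PRECONDITION & SPEC =====
def Spec_filter_health_news (items : List (List (String × String))) (out : List (List (String × String))) : Prop := out = filter_health_news_alt items
instance (items : List (List (String × String))) (out : List (List (String × String))) : Decidable (Spec_filter_health_news items out) := by unfold Spec_filter_health_news; infer_instance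

-- ===== CLAIM (what is proved, stated in full; the proofs are below) =====
def Claim_equal_filter_health_news : Prop := ∀ (items : List (List (String × String))), Dom_filter_health_news items → Spec_filter_health_news items (filter_health_news items)

-- ===== LEMMAS AND PROOFS =====

-- the eight domain strings are already lowercase
set_option maxHeartbeats 2000000 in
lemma domains_lower : SA_NEWS_DOMAINS.map PySem.Str.lower = SA_NEWS_DOMAINS := by decide

lemma reSearchCI_dom (s : String) :
    reSearchCI SA_NEWS_DOMAINS s
      = SA_NEWS_DOMAINS.any (fun d => PySem.Str.isIn d (PySem.Str.lower s)) := by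
  unfold reSearchCI
  conv_rhs => rw [← domains_lower]
  rw [List.any_map]
  rfl

-- ===== VERDICT (by name: the statement is the Claim_ definition above) =====
theorem filter_health_news_spec : Claim_equal_filter_health_news := by
  intro items _
  unfold Spec_filter_health_news filter_health_news filter_health_news_alt
  rw [PySem.List.foldl_append_if_eq_filter]
  simp only [List.nil_append]
  apply List.filter_congr
  intro item _
  rw [reSearchCI_dom]
  rfl
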